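-- pv_equiv track=rewrite | github.com/cosmologicon/grf | tests/dlx-profile.py | algox2o_args
-- ===== SOURCE A (Python) =====
-- def algox2o_args(subsets):
-- 	subsets = sorted(sorted(subset) for subset in subsets)
-- 	subsets.sort(key = len, reverse = True)
-- 	subsets = [set(subset) for subset in subsets]
-- 	nodes = sorted(set(node for subset in subsets for node in subset))
-- 	# containers[jnode] = the set of jsubsets that contain the given node
-- 	containers = [set(jsubset for jsubset, subset in enumerate(subsets) if node in subset) for node in nodes]
-- 	# overlappers[jsubset] = the set of jsubsets that overlap the given subset
-- 	overlappers = [set(ksubset for ksubset, s1 in enumerate(subsets) if s0 & s1) for s0 in subsets]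
-- 	jnodes, jsubsets = set(range(len(nodes))), set(range(len(subsets)))
-- 	return jnodes, jsubsets, subsets, containers, overlappers
-- ===== SOURCE B (Python) =====
-- def algox2o_args(subsets):
-- 	subsets = sorted(sorted(subset) for subset in subsets)
-- 	subsets.sort(key = len, reverse = True)
-- 	subsets = [set(subset) for subset in subsets]
-- 	# one-pass inverted index: index[node] = list of jsubsets containing node (increasing)
-- 	index = {}
-- 	for jsubset, subset in enumerate(subsets):
-- 		for node in subset:
-- 			index.setdefault(node, []).append(jsubset)
-- 	nodes = sorted(index)
-- 	containers = [set(index[node]) for node in nodes]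
-- 	# overlappers via the index: ksubset overlaps exactly the subsets sharing one of its nodes
-- 	overlappers = [set() for _ in subsets]
-- 	for ksubset, subset in enumerate(subsets):
-- 		js = set()
-- 		for node in subset:
-- 			js.update(index[node])
-- 		for jsubset in js:
-- 			overlappers[jsubset].add(ksubset)
-- 	jnodes, jsubsets = set(range(len(nodes))), set(range(len(subsets)))
-- 	return jnodes, jsubsets, subsets, containers, overlappers
-- ===== Notes on version B (the rewrite author's own statement) =====
-- stated objective: faster
-- what changed: Replaces A's per-node scan over all subsets and the all-pairs subset-intersection scan by a single inverted index (node -> list of containing subsets) built in one pass, from which both containers and overlappers are derived.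
import Mathlib
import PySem

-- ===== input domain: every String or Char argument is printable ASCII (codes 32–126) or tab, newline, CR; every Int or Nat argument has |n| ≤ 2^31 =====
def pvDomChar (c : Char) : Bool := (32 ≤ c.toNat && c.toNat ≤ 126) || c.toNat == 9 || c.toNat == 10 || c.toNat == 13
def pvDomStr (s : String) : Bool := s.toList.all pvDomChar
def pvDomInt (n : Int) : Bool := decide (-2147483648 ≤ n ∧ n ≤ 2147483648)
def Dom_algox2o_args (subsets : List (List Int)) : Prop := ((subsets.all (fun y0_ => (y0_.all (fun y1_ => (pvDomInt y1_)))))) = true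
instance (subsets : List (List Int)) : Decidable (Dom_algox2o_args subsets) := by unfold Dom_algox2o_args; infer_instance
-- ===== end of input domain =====

-- B replaces A's per-node scan over all subsets and the pairwise subset-intersection scan by a
-- single inverted index node -> subsets built in one pass, from which containers and overlappers
-- are derived (objective: faster; a timing run measures the speed-up).

-- ===== PORT A =====
def algox2o_args (subsets : List (List Int)) : List Int × List Int × List (List Int) × List (List Int) × List (List Int) :=
  -- subsets = sorted(sorted(subset) for subset in subsets); subsets.sort(key=len, reverse=True)
  let subsets1 := PySem.List.sorted (subsets.map (fun subset => PySem.List.sorted subset (fun x => x) false)) (fun x => x) false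
  let subsets2 := PySem.List.sorted subsets1 (fun s => PySem.List.len s) true
  -- subsets = [set(subset) for subset in subsets]
  let subs := subsets2.map (fun subset => PySem.Set.ofList subset)
  -- nodes = sorted(set(node for subset in subsets for node in subset))
  let nodes := PySem.List.sorted (PySem.Set.ofList (subs.flatMap (fun subset => subset))) (fun x => x) false
  -- containers = [set(jsubset for jsubset, subset in enumerate(subsets) if node in subset) for node in nodes]
  let containers := nodes.map (fun node =>
    PySem.Set.ofList (((PySem.List.enumerate subs 0).filter (fun p => PySem.Set.contains p.2 node)).map (fun p => p.1)))
  -- overlappers = [set(ksubset for ksubset, s1 in enumerate(subsets) if s0 & s1) for s0 in subsets]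
  let overlappers := subs.map (fun s0 =>
    PySem.Set.ofList (((PySem.List.enumerate subs 0).filter (fun p => !(PySem.Set.inter s0 p.2).isEmpty)).map (fun p => p.1)))
  let jnodes := PySem.Set.ofList (PySem.List.pyRange 0 (PySem.List.len nodes) 1)
  let jsubsets := PySem.Set.ofList (PySem.List.pyRange 0 (PySem.List.len subs) 1)
  (jnodes, jsubsets, subs, containers, overlappers)

-- ===== PORT B =====
-- overlappers[j] = v  with 0 ≤ j < len(overlappers); exact there (every j reached comes from the
-- inverted index, hence is a valid subset index)
def pySetItem {α : Type} (xs : List α) (i : Int) (v : α) : List α := xs.set i.toNat v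

def algox2o_args_alt (subsets : List (List Int)) : List Int × List Int × List (List Int) × List (List Int) × List (List Int) :=
  let subsets1 := PySem.List.sorted (subsets.map (fun subset => PySem.List.sorted subset (fun x => x) false)) (fun x => x) false
  let subsets2 := PySem.List.sorted subsets1 (fun s => PySem.List.len s) true
  let subs := subsets2.map (fun subset => PySem.Set.ofList subset)
  -- index = {}; for jsubset, subset in enumerate(subsets): for node in subset: index.setdefault(node, []).append(jsubset)
  let index : PySem.Dict Int (List Int) := (PySem.List.enumerate subs 0).foldl
    (fun d p => p.2.foldl (fun d node => d.modify node [] (fun l => l ++ [p.1])) d) PySem.Dict.empty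
  -- nodes = sorted(index)
  let nodes := PySem.List.sorted index.keys (fun x => x) false
  -- containers = [set(index[node]) for node in nodes]   (index[node]: every node in nodes is a key)
  let containers := nodes.map (fun node => PySem.Set.ofList (index.getD node []))
  -- overlappers = [set() for _ in subsets]; for ksubset, subset: js = union of index[node]; add ksubset to each overlappers[j]
  let ov0 : List (PySem.Set Int) := subs.map (fun _ => PySem.Set.empty)
  let overlappers := (PySem.List.enumerate subs 0).foldl (fun ov p =>
    let js := p.2.foldl (fun js node => PySem.Set.update js (index.getD node [])) PySem.Set.empty
    js.foldl (fun ov j => pySetItem ov j (PySem.Set.add (PySem.List.pyGetD ov j PySem.Set.empty) p.1)) ov) ov0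
  let jnodes := PySem.Set.ofList (PySem.List.pyRange 0 (PySem.List.len nodes) 1)
  let jsubsets := PySem.Set.ofList (PySem.List.pyRange 0 (PySem.List.len subs) 1)
  (jnodes, jsubsets, subs, containers, overlappers)

-- ===== PRECONDITION & SPEC =====
def Spec_algox2o_args (subsets : List (List Int)) (out : List Int × List Int × List (List Int) × List (List Int) × List (List Int)) : Prop := out = algox2o_args_alt subsets
instance (subsets : List (List Int)) (out : List Int × List Int × List (List Int) × List (List Int) × List (List Int)) : Decidable (Spec_algox2o_args subsets out) := by unfold Spec_algox2o_args; infer_instance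

-- ===== CLAIM (what is proved, stated in full; the proofs are below) =====
def Claim_equal_algox2o_args : Prop := ∀ (subsets : List (List Int)), Dom_algox2o_args subsets → Spec_algox2o_args subsets (algox2o_args subsets)

-- ===== LEMMAS AND PROOFS =====

-- the stream of (node, jsubset) incidence pairs that B's index-building loop processes
def pvStream (S : List (List Int)) : List (Int × Int) :=
  (PySem.List.enumerate S 0).flatMap (fun p => p.2.map (fun n => (n, p.1)))

-- B's index, as a standalone function of the prepared subset list
def pvIndex (S : List (List Int)) : PySem.Dict Int (List Int) :=
  (PySem.List.enumerate S 0).foldl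
    (fun d p => p.2.foldl (fun d node => d.modify node [] (fun l => l ++ [p.1])) d) PySem.Dict.empty

-- the filtered incidence stream of one subset: its contribution to index[n]
theorem pv_chunk (p : Int × List Int) (n : Int) (hnd : p.2.Nodup) :
    ((p.2.map (fun m => (m, p.1))).filter (fun q => q.1 == n)).map (fun q => q.2)
      = if PySem.Set.contains p.2 n then [p.1] else [] := by
  rw [List.filter_map]
  simp only [Function.comp_def]
  rw [List.map_map]
  simp only [Function.comp_def]
  rw [List.filter_beq]
  rw [PySem.Set.contains_eq_decide]
  by_cases hm : n ∈ p.2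
  · rw [List.count_eq_one_of_mem hnd hm]; simp [hm]
  · rw [List.count_eq_zero_of_not_mem hm]; simp [hm]

theorem pv_stream_filter (L : List (Int × List Int)) (h : ∀ p ∈ L, p.2.Nodup) (n : Int) :
    ((L.flatMap (fun p => p.2.map (fun m => (m, p.1)))).filter (fun q => q.1 == n)).map (fun q => q.2)
      = (L.filter (fun p => PySem.Set.contains p.2 n)).map (fun p => p.1) := by
  induction L with
  | nil => rfl
  | cons p L ih =>
    simp only [List.flatMap_cons, List.filter_append, List.map_append, List.filter_cons]
    rw [pv_chunk p n (h p List.mem_cons_self), ih (fun q hq => h q (List.mem_cons_of_mem _ hq))]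
    simp only [PySem.Set.contains_eq_decide]
    by_cases hm : n ∈ p.2 <;> simp [hm]

-- the nested loop over enumerate is the flat loop over the incidence stream
theorem pvIndex_eq_stream_fold (S : List (List Int)) :
    pvIndex S = (pvStream S).foldl (fun d q => d.modify q.1 [] (fun l => l ++ [q.2])) PySem.Dict.empty := by
  unfold pvIndex pvStream
  rw [List.foldl_flatMap]
  simp only [List.foldl_map]

-- index[n] is exactly the increasing list of subset indices whose subset contains n
theorem pvIndex_getD (S : List (List Int)) (hS : ∀ s ∈ S, s.Nodup) (n : Int) :
    (pvIndex S).getD n [] =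
      ((PySem.List.enumerate S 0).filter (fun p => PySem.Set.contains p.2 n)).map (fun p => p.1) := by
  rw [pvIndex_eq_stream_fold, PySem.Dict.getD_foldl_modify_append]
  rw [show (PySem.Dict.empty : PySem.Dict Int (List Int)).getD n [] = [] from rfl]
  rw [List.nil_append]
  exact pv_stream_filter (PySem.List.enumerate S 0)
    (fun p hp => by
      obtain ⟨k, hk, rfl⟩ := (PySem.List.mem_enumerate_iff S 0 p).mp hp
      exact hS _ (List.getElem_mem hk)) n

theorem pvIndex_keys (S : List (List Int)) :
    (pvIndex S).keys = PySem.Set.ofList S.flatten := by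
  rw [pvIndex_eq_stream_fold]
  rw [PySem.Dict.keys_foldl_modify_key (key := Prod.fst) (f := fun _ q l => l ++ [q.2])]
  have hmap : (pvStream S).map Prod.fst = S.flatten := by
    unfold pvStream
    rw [List.map_flatMap]
    simp only [List.map_map, Function.comp_def, List.map_id']
    rw [List.flatMap_def, PySem.List.map_snd_enumerate S 0]
  rw [hmap]
  rfl

theorem pv_mem_getD (S : List (List Int)) (hS : ∀ s ∈ S, s.Nodup) (n j : Int) :
    j ∈ (pvIndex S).getD n [] ↔ ∃ (k : Nat) (h : k < S.length), j = (k : Int) ∧ n ∈ S[k] := by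
  rw [pvIndex_getD S hS n]
  constructor
  · intro hj
    obtain ⟨p, hp, rfl⟩ := List.mem_map.mp hj
    obtain ⟨hpe, hcond⟩ := List.mem_filter.mp hp
    obtain ⟨k, hk, rfl⟩ := (PySem.List.mem_enumerate_iff S 0 p).mp hpe
    refine ⟨k, hk, by simp, ?_⟩
    simpa [PySem.Set.contains_eq_decide] using hcond
  · rintro ⟨k, hk, rfl, hn⟩
    refine List.mem_map.mpr ⟨(0 + (k : Int), S[k]), List.mem_filter.mpr ⟨?_, ?_⟩, by simp⟩
    · exact (PySem.List.mem_enumerate_iff S 0 _).mpr ⟨k, hk, rfl⟩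
    · simpa [PySem.Set.contains_eq_decide] using hn

-- membership in js, the union of index[n] over the nodes n of one subset
theorem pv_mem_js (g : Int → List Int) (s : List Int) (j : Int) (init : PySem.Set Int) :
    j ∈ s.foldl (fun js n => PySem.Set.update js (g n)) init ↔ j ∈ init ∨ ∃ n ∈ s, j ∈ g n := by
  induction s generalizing init with
  | nil => simp
  | cons a s ih =>
    rw [List.foldl_cons, ih]
    simp only [PySem.Set.mem_update, List.mem_cons]
    constructor
    · rintro (( h | h ) | ⟨n, hn, hj⟩)
      · exact Or.inl h
      · exact Or.inr ⟨a, Or.inl rfl, h⟩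
      · exact Or.inr ⟨n, Or.inr hn, hj⟩
    · rintro (h | ⟨n, (rfl | hn), hj⟩)
      · exact Or.inl (Or.inl h)
      · exact Or.inl (Or.inr hj)
      · exact Or.inr ⟨n, hn, hj⟩

theorem pv_nodup_js (g : Int → List Int) (s : List Int) (init : PySem.Set Int) (h : init.Nodup) :
    (s.foldl (fun js n => PySem.Set.update js (g n)) init).Nodup := by
  induction s generalizing init with
  | nil => exact h
  | cons a s ih => exact ih _ (PySem.Set.nodup_update init (g a) h)

-- the inner write loop: position m gains k exactly when m is in js
theorem pv_writeFold_length (js : List Int) (k : Int) (ov : List (PySem.Set Int)) :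
    (js.foldl (fun ov j => pySetItem ov j (PySem.Set.add (PySem.List.pyGetD ov j PySem.Set.empty) k)) ov).length = ov.length := by
  induction js generalizing ov with
  | nil => rfl
  | cons j js ih => rw [List.foldl_cons, ih]; simp [pySetItem]

theorem pv_writeFold_getElem (js : List Int) (k : Int) (ov : List (PySem.Set Int))
    (hnd : js.Nodup) (hv : ∀ j ∈ js, 0 ≤ j ∧ j.toNat < ov.length) (m : Nat) :
    (js.foldl (fun ov j => pySetItem ov j (PySem.Set.add (PySem.List.pyGetD ov j PySem.Set.empty) k)) ov)[m]?
      = (ov[m]?).map (fun row => if (m : Int) ∈ js then row.add k else row) := by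
  induction js generalizing ov with
  | nil => cases h : ov[m]? <;> simp [h]
  | cons j js ih =>
    rw [List.foldl_cons]
    obtain ⟨hj0, hjlen⟩ := hv j List.mem_cons_self
    have hget : PySem.List.pyGetD ov j PySem.Set.empty = ov[j.toNat] :=
      PySem.List.pyGetD_eq_getElem ov PySem.Set.empty hj0 (by omega)
    rw [ih _ hnd.of_cons (fun j' hj' => by
      have := hv j' (List.mem_cons_of_mem _ hj')
      simpa [pySetItem] using this)]
    have hset : (pySetItem ov j (PySem.Set.add (PySem.List.pyGetD ov j PySem.Set.empty) k))[m]?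
        = if j.toNat = m then some ((ov[j.toNat]).add k) else ov[m]? := by
      rw [hget]
      unfold pySetItem
      by_cases hjm : j.toNat = m
      · subst hjm; simp [hjlen]
      · simp [hjm]
    rw [hset]
    by_cases hjm : j.toNat = m
    · subst hjm
      have hmj : (j.toNat : Int) = j := Int.toNat_of_nonneg hj0
      have hmem : ((j.toNat : Int)) ∈ j :: js := by rw [hmj]; exact List.mem_cons_self
      have hnotin : ((j.toNat : Int)) ∉ js := by rw [hmj]; exact (List.nodup_cons.mp hnd).1
      rw [if_pos rfl, List.getElem?_eq_getElem hjlen]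
      simp only [Option.map_some]
      rw [if_neg hnotin, if_pos hmem]
    · have hne : ((m : Int)) ≠ j := by
        intro hc; apply hjm; rw [← hc]; simp
      rw [if_neg hjm]
      by_cases hm2 : ((m : Int)) ∈ js <;> simp [List.mem_cons, hne, hm2]

-- m is collected into js(s) exactly when subset m meets s
theorem pv_mem_js_iff (S : List (List Int)) (hS : ∀ s ∈ S, s.Nodup) (s : List Int) (m : Nat) :
    ((m : Int) ∈ s.foldl (fun js n => PySem.Set.update js ((pvIndex S).getD n [])) PySem.Set.empty)
      ↔ (!(PySem.Set.inter (S.getD m []) s).isEmpty) = true := by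
  rw [pv_mem_js]
  simp only [PySem.Set.empty, List.not_mem_nil, false_or]
  constructor
  · rintro ⟨n, hn, hj⟩
    obtain ⟨k, hk, hmk, hnk⟩ := (pv_mem_getD S hS n _).mp hj
    have hkm : k = m := by exact_mod_cast hmk.symm
    subst hkm
    have hgd : S.getD k [] = S[k] := List.getD_eq_getElem S [] hk
    have hne : PySem.Set.inter (S.getD k []) s ≠ [] := by
      intro hemp
      have : n ∈ PySem.Set.inter (S.getD k []) s := (PySem.Set.mem_inter _ _ _).mpr ⟨hgd ▸ hnk, hn⟩
      rw [hemp] at this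
      exact List.not_mem_nil this
    simpa [List.isEmpty_iff] using hne
  · intro hne
    have : PySem.Set.inter (S.getD m []) s ≠ [] := by
      simpa [List.isEmpty_iff] using hne
    obtain ⟨n, hnmem⟩ := List.exists_mem_of_ne_nil _ this
    obtain ⟨hn1, hn2⟩ := (PySem.Set.mem_inter _ _ _).mp hnmem
    have hm : m < S.length := by
      by_contra hge
      rw [List.getD_eq_default S [] (by omega)] at hn1
      exact List.not_mem_nil hn1
    refine ⟨n, hn2, (pv_mem_getD S hS n _).mpr ⟨m, hm, rfl, ?_⟩⟩
    rwa [List.getD_eq_getElem S [] hm] at hn1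

-- the outer overlappers loop, row by row
theorem pv_outer (S : List (List Int)) (hS : ∀ s ∈ S, s.Nodup)
    (T : List (Int × List Int)) (ov : List (PySem.Set Int))
    (hlen : ov.length = S.length)
    (hp : T.Pairwise (fun p q => p.1 < q.1))
    (hbnd : ∀ (m : Nat) (hm : m < ov.length), ∀ x ∈ ov[m], ∀ p ∈ T, x < p.1)
    (m : Nat) :
    (T.foldl (fun ov p =>
        (p.2.foldl (fun js n => PySem.Set.update js ((pvIndex S).getD n [])) PySem.Set.empty).foldl
          (fun ov j => pySetItem ov j (PySem.Set.add (PySem.List.pyGetD ov j PySem.Set.empty) p.1)) ov) ov)[m]?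
      = (ov[m]?).map (fun row =>
          row ++ (T.filter (fun p => !(PySem.Set.inter (S.getD m []) p.2).isEmpty)).map (fun p => p.1)) := by
  induction T generalizing ov with
  | nil => cases h : ov[m]? <;> simp [h]
  | cons p T ih =>
    rw [List.foldl_cons]
    have hjs_nd : (p.2.foldl (fun js n => PySem.Set.update js ((pvIndex S).getD n [])) PySem.Set.empty).Nodup :=
      pv_nodup_js _ _ _ List.nodup_nil
    have hv : ∀ j ∈ p.2.foldl (fun js n => PySem.Set.update js ((pvIndex S).getD n [])) PySem.Set.empty,
        0 ≤ j ∧ j.toNat < ov.length := by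
      intro j hj
      rw [pv_mem_js] at hj
      rcases hj with h | ⟨n, _, hj⟩
      · exact absurd h (List.not_mem_nil)
      · obtain ⟨k, hk, rfl, _⟩ := (pv_mem_getD S hS n _).mp hj
        constructor
        · exact Int.natCast_nonneg k
        · rw [Int.toNat_natCast]; omega
    have hw := pv_writeFold_getElem
      (p.2.foldl (fun js n => PySem.Set.update js ((pvIndex S).getD n [])) PySem.Set.empty) p.1 ov hjs_nd hv
    have hlen1 := pv_writeFold_length
      (p.2.foldl (fun js n => PySem.Set.update js ((pvIndex S).getD n [])) PySem.Set.empty) p.1 ov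
    rw [ih _ (by rw [hlen1]; exact hlen) hp.of_cons]
    · rw [hw m]
      rw [Option.map_map]
      rw [List.filter_cons]
      cases hovm : ov[m]? with
      | none => simp
      | some row =>
        have hm : m < ov.length := by
          by_contra hge
          rw [List.getElem?_eq_none_iff.mpr (by omega)] at hovm
          simp at hovm
        have hrow : ov[m] = row := by
          rw [List.getElem?_eq_getElem hm] at hovm
          exact Option.some.inj hovm
        simp only [Option.map_some, Function.comp_def]
        by_cases hcond : (!(PySem.Set.inter (S.getD m []) p.2).isEmpty) = true
        · have hmem : ((m : Int)) ∈ p.2.foldl (fun js n => PySem.Set.update js ((pvIndex S).getD n [])) PySem.Set.empty :=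
            (pv_mem_js_iff S hS p.2 m).mpr hcond
          have hnotin : p.1 ∉ row := by
            intro hc
            have := hbnd m hm p.1 (hrow ▸ hc) p List.mem_cons_self
            omega
          rw [if_pos hmem, if_pos hcond]
          rw [PySem.Set.add_of_not_mem hnotin]
          simp [List.append_assoc]
        · have hmem : ((m : Int)) ∉ p.2.foldl (fun js n => PySem.Set.update js ((pvIndex S).getD n [])) PySem.Set.empty := by
            intro hc
            exact hcond ((pv_mem_js_iff S hS p.2 m).mp hc)
          rw [if_neg hmem, if_neg hcond]
    · intro m' hm' x hx q hq
      have hm'ov : m' < ov.length := by rw [hlen1] at hm'; exact hm'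
      have hx' := hw m'
      rw [List.getElem?_eq_getElem hm', List.getElem?_eq_getElem hm'ov] at hx'
      have heq := Option.some.inj hx'
      have hxm := hx
      rw [heq] at hxm
      simp only [] at hxm
      split at hxm
      · rcases (PySem.Set.mem_add _ _ _).mp hxm with h | rfl
        · exact hbnd m' hm'ov x h q (List.mem_cons_of_mem _ hq)
        · exact (List.pairwise_cons.mp hp).1 q hq
      · exact hbnd m' hm'ov x hxm q (List.mem_cons_of_mem _ hq)

-- the shared preprocessing (sort each subset, lex-sort, stable sort by length desc, dedup)
def pvPrep (subsets : List (List Int)) : List (List Int) :=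
  (PySem.List.sorted (PySem.List.sorted (subsets.map (fun subset => PySem.List.sorted subset (fun x => x) false)) (fun x => x) false) (fun s => PySem.List.len s) true).map (fun subset => PySem.Set.ofList subset)

theorem pv_prep_nodup (subsets : List (List Int)) : ∀ s ∈ pvPrep subsets, s.Nodup := by
  intro s hs
  obtain ⟨t, _, rfl⟩ := List.mem_map.mp hs
  exact PySem.Set.nodup_ofList t

-- A's five outputs, as a function of the prepared subset list
def pvTupleA (S : List (List Int)) : List Int × List Int × List (List Int) × List (List Int) × List (List Int) :=
  (PySem.Set.ofList (PySem.List.pyRange 0 (PySem.List.len (PySem.List.sorted (PySem.Set.ofList (S.flatMap (fun subset => subset))) (fun x => x) false)) 1),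
   PySem.Set.ofList (PySem.List.pyRange 0 (PySem.List.len S) 1),
   S,
   (PySem.List.sorted (PySem.Set.ofList (S.flatMap (fun subset => subset))) (fun x => x) false).map (fun node => PySem.Set.ofList (((PySem.List.enumerate S 0).filter (fun p => PySem.Set.contains p.2 node)).map (fun p => p.1))),
   S.map (fun s0 => PySem.Set.ofList (((PySem.List.enumerate S 0).filter (fun p => !(PySem.Set.inter s0 p.2).isEmpty)).map (fun p => p.1))))

-- B's five outputs, as a function of the prepared subset list
def pvTupleB (S : List (List Int)) : List Int × List Int × List (List Int) × List (List Int) × List (List Int) :=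
  (PySem.Set.ofList (PySem.List.pyRange 0 (PySem.List.len (PySem.List.sorted (pvIndex S).keys (fun x => x) false)) 1),
   PySem.Set.ofList (PySem.List.pyRange 0 (PySem.List.len S) 1),
   S,
   (PySem.List.sorted (pvIndex S).keys (fun x => x) false).map (fun node => PySem.Set.ofList ((pvIndex S).getD node [])),
   (PySem.List.enumerate S 0).foldl (fun ov p =>
      (p.2.foldl (fun js n => PySem.Set.update js ((pvIndex S).getD n [])) PySem.Set.empty).foldl
        (fun ov j => pySetItem ov j (PySem.Set.add (PySem.List.pyGetD ov j PySem.Set.empty) p.1)) ov)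
     (S.map (fun _ => PySem.Set.empty)))

theorem pv_nodes_eq (S : List (List Int)) :
    PySem.List.sorted (PySem.Set.ofList (S.flatMap (fun subset => subset))) (fun x => x) false
      = PySem.List.sorted (pvIndex S).keys (fun x => x) false := by
  rw [pvIndex_keys, List.flatMap_id']

theorem pv_overlap_list_nodup (S : List (List Int)) (c : Int × List Int → Bool) :
    (((PySem.List.enumerate S 0).filter c).map (fun p => p.1)).Nodup := by
  have h1 := PySem.List.pairwise_lt_enumerate S 0
  have h2 := h1.filter c
  have h3 : (((PySem.List.enumerate S 0).filter c).map (fun p => p.1)).Pairwise (· < ·) :=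
    h2.map _ (fun a b hab => hab)
  exact h3.imp (fun {a b} hab => by omega)

theorem pv_main (S : List (List Int)) (hS : ∀ s ∈ S, s.Nodup) : pvTupleA S = pvTupleB S := by
  unfold pvTupleA pvTupleB
  refine congrArg₂ Prod.mk ?_ (congrArg₂ Prod.mk rfl (congrArg₂ Prod.mk rfl (congrArg₂ Prod.mk ?_ ?_)))
  · rw [pv_nodes_eq]
  · rw [pv_nodes_eq]
    refine List.map_congr_left (fun node _ => ?_)
    exact congrArg PySem.Set.ofList (pvIndex_getD S hS node).symm
  · apply List.ext_getElem?
    intro m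
    rw [pv_outer S hS (PySem.List.enumerate S 0) (S.map (fun _ => PySem.Set.empty))
        (by simp) (PySem.List.pairwise_lt_enumerate S 0)
        (fun m' hm' x hx p _ => by
          rw [List.getElem_map] at hx
          exact absurd hx (List.not_mem_nil)) m]
    rw [List.getElem?_map, List.getElem?_map, Option.map_map]
    cases h : S[m]? with
    | none => simp
    | some s0 =>
      have hm : m < S.length := by
        by_contra hge
        rw [List.getElem?_eq_none_iff.mpr (by omega)] at h
        simp at h
      have hs0 : S[m] = s0 := by
        rw [List.getElem?_eq_getElem hm] at h
        exact Option.some.inj h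
      simp only [Option.map_some, Function.comp_def]
      rw [List.getD_eq_getElem S [] hm, hs0]
      rw [PySem.Set.ofList_eq_self_of_nodup _ (pv_overlap_list_nodup S _)]
      rw [show (PySem.Set.empty : PySem.Set Int) = [] from rfl, List.nil_append]

-- ===== VERDICT (by name: the statement is the Claim_ definition above) =====
theorem algox2o_args_spec : Claim_equal_algox2o_args := by
  intro subsets _
  show algox2o_args subsets = algox2o_args_alt subsets
  have e1 : algox2o_args subsets = pvTupleA (pvPrep subsets) := rfl
  have e2 : algox2o_args_alt subsets = pvTupleB (pvPrep subsets) := rfl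
  rw [e1, e2]
  exact pv_main (pvPrep subsets) (pv_prep_nodup subsets)
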